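-- pv_equiv track=rewrite | github.com/anooplabiitkgp/PyAR | utils/fragment_make.py | get_fragment_string
-- ===== SOURCE A (Python) =====
-- def get_fragment_string(all_xyz_file_atom_number):
--     """This function will make the lines specified by the dftd3 code
--        (modified by A. Anoop & M. Waller) for fragment file.
--     """
--     init = 1
--     final = 0
--     line = []
--     for i in range(len(all_xyz_file_atom_number)):
--         final = int(all_xyz_file_atom_number[i]) + final
--         string = str(init) + "-" + str(final)
--         init = final + 1
--         line.append(string)
--     return line
-- ===== SOURCE B (Python) =====
-- def get_fragment_string(all_xyz_file_atom_number):
--     bounds = [0]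
--     for x in all_xyz_file_atom_number:
--         bounds.append(bounds[-1] + int(x))
--     return ["{}-{}".format(p + 1, c) for p, c in zip(bounds, bounds[1:])]
-- ===== Notes on version B (the rewrite author's own statement) =====
-- stated objective: alternative
-- what changed: Replaces the single stateful loop threading init/final with a precomputed prefix-sum boundary table plus a separate formatting pass over consecutive boundary pairs.
import Mathlib
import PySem

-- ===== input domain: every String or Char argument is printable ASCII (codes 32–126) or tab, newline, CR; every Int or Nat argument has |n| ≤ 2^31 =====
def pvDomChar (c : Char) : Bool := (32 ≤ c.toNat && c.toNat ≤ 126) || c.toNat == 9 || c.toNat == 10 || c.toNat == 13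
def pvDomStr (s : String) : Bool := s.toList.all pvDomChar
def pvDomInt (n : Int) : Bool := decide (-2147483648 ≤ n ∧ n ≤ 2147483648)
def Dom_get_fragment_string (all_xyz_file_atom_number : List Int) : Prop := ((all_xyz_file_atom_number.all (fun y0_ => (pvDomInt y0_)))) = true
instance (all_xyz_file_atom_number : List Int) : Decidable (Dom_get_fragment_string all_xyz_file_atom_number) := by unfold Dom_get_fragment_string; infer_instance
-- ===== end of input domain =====

-- B builds the prefix-sum boundary table first and formats consecutive boundary pairs in a second pass,
-- instead of A's single loop threading init/final; same cost, different decomposition (return value proved equal).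

-- ===== PORT A =====
-- A's loop over the list, threading (init, final, line); appends str(init) + "-" + str(final) each step.
def getFragA : List Int → Int → Int → List String → List String
  | [], _, _, line => line
  | x :: xs, init, final, line =>
      let final' := x + final
      getFragA xs (final' + 1) final' (line ++ [PySem.Int.toStr init ++ "-" ++ PySem.Int.toStr final'])

def get_fragment_string (all_xyz_file_atom_number : List Int) : List String :=
  getFragA all_xyz_file_atom_number 1 0 []

-- ===== PORT B =====
def get_fragment_string_alt (all_xyz_file_atom_number : List Int) : List String :=
  let bounds := all_xyz_file_atom_number.scanl (fun a x => a + x) 0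
  (bounds.zip bounds.tail).map (fun pc => PySem.Int.toStr (pc.1 + 1) ++ "-" ++ PySem.Int.toStr pc.2)

-- ===== PRECONDITION & SPEC =====
def Spec_get_fragment_string (all_xyz_file_atom_number : List Int) (out : List String) : Prop := out = get_fragment_string_alt all_xyz_file_atom_number
instance (all_xyz_file_atom_number : List Int) (out : List String) : Decidable (Spec_get_fragment_string all_xyz_file_atom_number out) := by unfold Spec_get_fragment_string; infer_instance

-- ===== CLAIM (what is proved, stated in full; the proofs are below) =====
def Claim_equal_get_fragment_string : Prop := ∀ (all_xyz_file_atom_number : List Int), Dom_get_fragment_string all_xyz_file_atom_number → Spec_get_fragment_string all_xyz_file_atom_number (get_fragment_string all_xyz_file_atom_number)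

-- ===== LEMMAS AND PROOFS =====
theorem getFragA_eq (xs : List Int) : ∀ (f : Int) (acc : List String),
    getFragA xs (f + 1) f acc =
      acc ++ ((xs.scanl (fun a x => a + x) f).zip (xs.scanl (fun a x => a + x) f).tail).map
        (fun pc => PySem.Int.toStr (pc.1 + 1) ++ "-" ++ PySem.Int.toStr pc.2) := by
  induction xs with
  | nil => intro f acc; simp [getFragA, List.scanl]
  | cons x xs ih =>
      intro f acc
      have hc : f + x = x + f := by ring
      simp only [getFragA, List.scanl]
      rw [ih (x + f)]
      cases xs <;> simp [List.scanl, hc]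

-- ===== VERDICT (by name: the statement is the Claim_ definition above) =====
theorem get_fragment_string_spec : Claim_equal_get_fragment_string := by
  intro l _
  unfold Spec_get_fragment_string get_fragment_string get_fragment_string_alt
  simpa using getFragA_eq l 0 []
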